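-- pv_equiv track=rewrite | github.com/danhquyen2004/BaiTap_Python_Finetest | TAPSO23.py | in_tap_hop_N23
-- ===== SOURCE A (Python) =====
-- def in_tap_hop_N23(N):
--     # Khởi tạo tập N23 và danh sách kết quả
--     tap_hop_N23 = {1}
--     ket_qua = [1]
--
--     while len(ket_qua) < N:
--         i = 0
--         while True:
--             so_moi_1 = 2 * ket_qua[i] + 1
--             so_moi_2 = 3 * ket_qua[i] + 1
--
--             if so_moi_1 not in tap_hop_N23:
--                 tap_hop_N23.add(so_moi_1)
--                 ket_qua.append(so_moi_1)
--                 break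
--             elif so_moi_2 not in tap_hop_N23:
--                 tap_hop_N23.add(so_moi_2)
--                 ket_qua.append(so_moi_2)
--                 break
--             i += 1
--
--     return ket_qua[:N]
-- ===== SOURCE B (Python) =====
-- def in_tap_hop_N23(N):
--     # Single pass over indices: each element emits its two children (2x+1 first)
--     # exactly once, skipping duplicates; no rescan, no skip loop.  Correct since
--     # the seen-set only grows, so A's rescans from 0 always land back on the
--     # current index until both of its children are emitted.
--     seen = {1}
--     res = [1]
--     i = 0
--     while len(res) < N:
--         x = res[i]
--         for c in (2 * x + 1, 3 * x + 1):
--             if c not in seen: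
--                 seen.add(c)
--                 res.append(c)
--         i += 1
--     return res[:N]
-- ===== Notes on version B (the rewrite author's own statement) =====
-- stated objective: faster
-- what changed: Replaces A's rescan-from-index-0 search with a single left-to-right pass that visits each index once and appends both of its fresh children (2x+1 then 3x+1) in one step, then slices to N.
import Mathlib
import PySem

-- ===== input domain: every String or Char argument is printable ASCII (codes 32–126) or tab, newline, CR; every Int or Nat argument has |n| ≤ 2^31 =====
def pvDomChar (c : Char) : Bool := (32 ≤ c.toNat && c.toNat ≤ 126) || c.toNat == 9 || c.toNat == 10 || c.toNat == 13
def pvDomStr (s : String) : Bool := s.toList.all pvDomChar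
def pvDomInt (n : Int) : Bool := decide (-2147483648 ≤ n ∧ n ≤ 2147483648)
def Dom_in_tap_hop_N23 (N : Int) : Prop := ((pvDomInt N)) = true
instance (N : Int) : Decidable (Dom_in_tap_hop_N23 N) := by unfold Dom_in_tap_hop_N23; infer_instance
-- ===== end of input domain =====

-- B replaces A's quadratic rescan-from-0 search by a single left-to-right pass
-- that emits both fresh children of each index at once; same return value.

-- ===== PORT A =====
-- A's inner `while True` scan from index i: first index whose child set yields a
-- fresh number (2x+1 preferred).  `if h : i < l.length` is Python's ket_qua[i]
-- bounds check; the `none` branch is Python's (unreachable) IndexError.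
def pvScanA (s : PySem.Set Int) (l : List Int) (i : Nat) : Option Int :=
  if h : i < l.length then
    let x := l[i]
    if ¬ PySem.Set.contains s (2 * x + 1) then some (2 * x + 1)
    else if ¬ PySem.Set.contains s (3 * x + 1) then some (3 * x + 1)
    else pvScanA s l (i + 1)
  else none
termination_by l.length - i

-- A's outer `while len(ket_qua) < N`: each pass appends exactly one element, so
-- it runs (N-1).toNat times from the singleton start.
def pvLoopA (s : PySem.Set Int) (l : List Int) : Nat → List Int
  | 0 => l
  | fuel + 1 =>
    match pvScanA s l 0 with
    | none => l
    | some v => pvLoopA (PySem.Set.add s v) (l ++ [v]) fuel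

def in_tap_hop_N23 (N : Int) : List Int :=
  PySem.List.slice (pvLoopA (PySem.Set.ofList [1]) [1] (N - 1).toNat) none (some N)

-- ===== PORT B =====
-- B's `for c in (2*x+1, 3*x+1)` body: append c if fresh.
def pvAddChild (sl : PySem.Set Int × List Int) (c : Int) : PySem.Set Int × List Int :=
  if PySem.Set.contains sl.1 c then sl else (PySem.Set.add sl.1 c, sl.2 ++ [c])

-- B's `while len(res) < N` with the index i advancing once per pass: at most
-- N.toNat passes (each pass needs i < len(res) < N and increments i), so
-- N.toNat is enough fuel.  The `none` branch is Python's (unreachable) IndexError.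
def pvLoopB (N : Int) (s : PySem.Set Int) (l : List Int) (i : Nat) : Nat → List Int
  | 0 => l
  | fuel + 1 =>
    if (l.length : Int) < N then
      match PySem.List.pyGet? l (i : Int) with
      | none => l
      | some x =>
        let sl := [2 * x + 1, 3 * x + 1].foldl pvAddChild (s, l)
        pvLoopB N sl.1 sl.2 (i + 1) fuel
    else l

def in_tap_hop_N23_alt (N : Int) : List Int :=
  PySem.List.slice (pvLoopB N (PySem.Set.ofList [1]) [1] 0 N.toNat) none (some N)

-- ===== PRECONDITION & SPEC =====
def Spec_in_tap_hop_N23 (N : Int) (out : List Int) : Prop := out = in_tap_hop_N23_alt N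
instance (N : Int) (out : List Int) : Decidable (Spec_in_tap_hop_N23 N out) := by unfold Spec_in_tap_hop_N23; infer_instance

-- ===== CLAIM (what is proved, stated in full; the proofs are below) =====
def Claim_equal_in_tap_hop_N23 : Prop := ∀ (N : Int), Dom_in_tap_hop_N23 N → Spec_in_tap_hop_N23 N (in_tap_hop_N23 N)

-- ===== LEMMAS AND PROOFS =====

-- index j is exhausted w.r.t. set s: both children already present
def pvEx (s : PySem.Set Int) (l : List Int) (j : Nat) : Prop :=
  ∀ (h : j < l.length), (2 * l[j] + 1) ∈ s ∧ (3 * l[j] + 1) ∈ s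

lemma pvScanA_skip (s : PySem.Set Int) (l : List Int) (i : Nat) (hx : pvEx s l i) :
    pvScanA s l i = pvScanA s l (i + 1) := by
  by_cases h : i < l.length
  · obtain ⟨h1, h2⟩ := hx h
    rw [pvScanA]
    simp [h, h1, h2]
  · rw [pvScanA, pvScanA]
    have h' : ¬ i + 1 < l.length := by omega
    simp [h, h']

lemma pvScanA_from_zero (s : PySem.Set Int) (l : List Int) (p : Nat)
    (hx : ∀ j, j < p → pvEx s l j) : pvScanA s l 0 = pvScanA s l p := by
  induction p with
  | zero => rfl
  | succ p ih =>
    rw [ih (fun j hj => hx j (by omega)), pvScanA_skip s l p (hx p (by omega))]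

lemma pvScanA_none (s : PySem.Set Int) (l : List Int)
    (hx : ∀ j, j < l.length → pvEx s l j) : pvScanA s l 0 = none := by
  rw [pvScanA_from_zero s l l.length hx, pvScanA]
  simp

lemma pvLoopA_stuck (s : PySem.Set Int) (l : List Int) (f : Nat)
    (h : pvScanA s l 0 = none) : pvLoopA s l f = l := by
  cases f with
  | zero => rfl
  | succ f => rw [pvLoopA, h]

lemma pvLoopB_stop (N : Int) (s : PySem.Set Int) (l : List Int) (i : Nat) (f : Nat)
    (h : ¬ (l.length : Int) < N) : pvLoopB N s l i f = l := by
  cases f with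
  | zero => rfl
  | succ f => rw [pvLoopB]; simp [h]

lemma pvEx_mono (s : PySem.Set Int) (v w : Int) (l : List Int) (j : Nat)
    (hjl : j < l.length) (hx : pvEx s l j) : pvEx (PySem.Set.add s v) (l ++ [w]) j := by
  intro h
  obtain ⟨h1, h2⟩ := hx hjl
  have e : (l ++ [w])[j] = l[j] := List.getElem_append_left hjl
  rw [e]
  exact ⟨(PySem.Set.mem_add s v _).mpr (Or.inl h1), (PySem.Set.mem_add s v _).mpr (Or.inl h2)⟩


-- pvEx from a successful lookup of the element
lemma pvEx_of_get (s' : PySem.Set Int) (l' : List Int) (i : Nat) (x : Int)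
    (hx : l'[i]? = some x)
    (h1 : (2 * x + 1) ∈ s') (h2 : (3 * x + 1) ∈ s') : pvEx s' l' i := by
  intro h
  have hx' : l'[i] = x := by
    rw [List.getElem?_eq_getElem h] at hx
    exact Option.some_inj.mp hx
  rw [hx']
  exact ⟨h1, h2⟩

lemma pvAddChild_mem (s : PySem.Set Int) (l : List Int) (c : Int) (h : c ∈ s) :
    pvAddChild (s, l) c = (s, l) := by
  simp [pvAddChild]
  exact h

lemma pvAddChild_not_mem (s : PySem.Set Int) (l : List Int) (c : Int) (h : c ∉ s) :
    pvAddChild (s, l) c = (PySem.Set.add s c, l ++ [c]) := by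
  simp [pvAddChild]
  exact h

lemma pvMain (N : Int) (fB : Nat) (s : PySem.Set Int) (l : List Int) (i : Nat)
    (hinv : ∀ j, j < i → pvEx s l j)
    (hpos : ∀ x ∈ l, (1 : Int) ≤ x)
    (hfb : i + fB = N.toNat) :
    (pvLoopA s l (N.toNat - l.length)).take N.toNat
      = (pvLoopB N s l i fB).take N.toNat := by
  induction fB generalizing s l i with
  | zero =>
    rw [pvLoopB]
    by_cases hl : l.length < N.toNat
    · have : ∀ j, j < l.length → pvEx s l j := fun j hj => hinv j (by omega)
      rw [pvLoopA_stuck s l _ (pvScanA_none s l this)]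
    · have : N.toNat - l.length = 0 := by omega
      rw [this, pvLoopA]
  | succ fB ih =>
    rw [pvLoopB]
    by_cases hlen : (l.length : Int) < N
    · have hNpos : 0 < N := by
        have : (0 : Int) ≤ l.length := by positivity
        omega
      have hlenN : l.length < N.toNat := by omega
      simp only [hlen, if_pos]
      by_cases hi : i < l.length
      · have hget : PySem.List.pyGet? l (i : Int) = some l[i] := by
          rw [PySem.List.pyGet?_natCast]
          exact List.getElem?_eq_getElem hi
        rw [hget]
        dsimp only
        set x := l[i] with hxdef
        have hx1 : (1 : Int) ≤ x := hpos x (List.getElem_mem hi)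
        have hne : (2 * x + 1 : Int) ≠ 3 * x + 1 := by omega
        have hfresh : pvScanA s l 0 = pvScanA s l i :=
          pvScanA_from_zero s l i (fun j hj => hinv j hj)
        by_cases h1 : (2 * x + 1) ∈ s
        · by_cases h2 : (3 * x + 1) ∈ s
          · -- both children stale: B appends nothing, A's scan also skips i
            have hfold : [2 * x + 1, 3 * x + 1].foldl pvAddChild (s, l) = (s, l) := by
              rw [List.foldl_cons, pvAddChild_mem s l _ h1,
                List.foldl_cons, pvAddChild_mem s l _ h2, List.foldl_nil]
            rw [hfold]
            exact ih s l (i + 1) (fun j hj => by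
              rcases Nat.lt_succ_iff_lt_or_eq.mp hj with hj' | hj'
              · exact hinv j hj'
              · exact hj' ▸ pvEx_of_get s l i x
                  (List.getElem?_eq_getElem hi) h1 h2) hpos (by omega)
          · -- 2x+1 stale, 3x+1 fresh: both sides append exactly 3x+1
            have hfold : [2 * x + 1, 3 * x + 1].foldl pvAddChild (s, l)
                = (PySem.Set.add s (3 * x + 1), l ++ [3 * x + 1]) := by
              rw [List.foldl_cons, pvAddChild_mem s l _ h1,
                List.foldl_cons, pvAddChild_not_mem s l _ h2, List.foldl_nil]
            rw [hfold]
            have hscan : pvScanA s l 0 = some (3 * x + 1) := by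
              rw [hfresh, pvScanA]
              simp [hi, ← hxdef, h1, h2]
            have hfa : N.toNat - l.length = (N.toNat - (l.length + 1)) + 1 := by omega
            rw [hfa, pvLoopA, hscan]
            dsimp only
            have := ih (PySem.Set.add s (3 * x + 1)) (l ++ [3 * x + 1]) (i + 1)
              (fun j hj => by
                rcases Nat.lt_succ_iff_lt_or_eq.mp hj with hj' | hj'
                · exact pvEx_mono s _ _ l j (by omega) (hinv j hj')
                · refine hj' ▸ pvEx_of_get _ (l ++ [3 * x + 1]) i x ?_
                    ((PySem.Set.mem_add s _ _).mpr (Or.inl h1))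
                    ((PySem.Set.mem_add s _ _).mpr (Or.inr rfl))
                  rw [List.getElem?_append_left hi]
                  exact List.getElem?_eq_getElem hi)
              (fun y hy => by
                rcases List.mem_append.mp hy with hy' | hy'
                · exact hpos y hy'
                · simp at hy'; omega)
              (by omega)
            simpa [List.length_append] using this
        · -- 2x+1 fresh: A appends it first
          have hscan : pvScanA s l 0 = some (2 * x + 1) := by
            rw [hfresh, pvScanA]
            simp [hi, ← hxdef, h1]
          have hfa : N.toNat - l.length = (N.toNat - (l.length + 1)) + 1 := by omega
          rw [hfa, pvLoopA, hscan]
          dsimp only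
          by_cases h2 : (3 * x + 1) ∈ s
          · -- 3x+1 stale: both sides append exactly 2x+1
            have hfold : [2 * x + 1, 3 * x + 1].foldl pvAddChild (s, l)
                = (PySem.Set.add s (2 * x + 1), l ++ [2 * x + 1]) := by
              have h2' : (3 * x + 1) ∈ PySem.Set.add s (2 * x + 1) :=
                (PySem.Set.mem_add s _ _).mpr (Or.inl h2)
              rw [List.foldl_cons, pvAddChild_not_mem s l _ h1,
                List.foldl_cons, pvAddChild_mem _ _ _ h2', List.foldl_nil]
            rw [hfold]
            have := ih (PySem.Set.add s (2 * x + 1)) (l ++ [2 * x + 1]) (i + 1)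
              (fun j hj => by
                rcases Nat.lt_succ_iff_lt_or_eq.mp hj with hj' | hj'
                · exact pvEx_mono s _ _ l j (by omega) (hinv j hj')
                · refine hj' ▸ pvEx_of_get _ (l ++ [2 * x + 1]) i x ?_
                    ((PySem.Set.mem_add s _ _).mpr (Or.inr rfl))
                    ((PySem.Set.mem_add s _ _).mpr (Or.inl h2))
                  rw [List.getElem?_append_left hi]
                  exact List.getElem?_eq_getElem hi)
              (fun y hy => by
                rcases List.mem_append.mp hy with hy' | hy'
                · exact hpos y hy'
                · simp at hy'; omega)
              (by omega)
            simpa [List.length_append] using this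
          · -- both fresh: B appends both at once; A needs two scan passes
            have h2c : (3 * x + 1) ∉ PySem.Set.add s (2 * x + 1) := by
              intro hmem
              rcases (PySem.Set.mem_add s _ _).mp hmem with h | h
              · exact h2 h
              · exact hne h.symm
            have hfold : [2 * x + 1, 3 * x + 1].foldl pvAddChild (s, l)
                = (PySem.Set.add (PySem.Set.add s (2 * x + 1)) (3 * x + 1),
                   (l ++ [2 * x + 1]) ++ [3 * x + 1]) := by
              rw [List.foldl_cons, pvAddChild_not_mem s l _ h1,
                List.foldl_cons, pvAddChild_not_mem _ _ _ h2c, List.foldl_nil]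
            rw [hfold]
            set s1 := PySem.Set.add s (2 * x + 1) with hs1
            set l1 := l ++ [2 * x + 1] with hl1
            have hl1len : l1.length = l.length + 1 := by simp [hl1]
            have hinv1 : ∀ j, j < i → pvEx s1 l1 j :=
              fun j hj => pvEx_mono s _ _ l j (by omega) (hinv j hj)
            by_cases hf : l.length + 1 < N.toNat
            · -- room for both appends in A
              have hscan1 : pvScanA s1 l1 0 = some (3 * x + 1) := by
                rw [pvScanA_from_zero s1 l1 i hinv1, pvScanA]
                have hi1 : i < l1.length := by omega
                have e : l1[i] = x := List.getElem_append_left hi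
                have h1' : (2 * x + 1) ∈ s1 := (PySem.Set.mem_add s _ _).mpr (Or.inr rfl)
                simp [hi1, e, h1', h2c]
              have hfa1 : N.toNat - (l.length + 1) = (N.toNat - (l.length + 2)) + 1 := by
                omega
              rw [hfa1, pvLoopA, hscan1]
              dsimp only
              have := ih (PySem.Set.add s1 (3 * x + 1)) (l1 ++ [3 * x + 1]) (i + 1)
                (fun j hj => by
                  rcases Nat.lt_succ_iff_lt_or_eq.mp hj with hj' | hj'
                  · exact pvEx_mono s1 _ _ l1 j (by omega) (hinv1 j hj')
                  · have hi1 : i < l1.length := by omega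
                    refine hj' ▸ pvEx_of_get _ (l1 ++ [3 * x + 1]) i x ?_
                      ((PySem.Set.mem_add s1 _ _).mpr
                        (Or.inl ((PySem.Set.mem_add s _ _).mpr (Or.inr rfl))))
                      ((PySem.Set.mem_add s1 _ _).mpr (Or.inr rfl))
                    rw [List.getElem?_append_left hi1, hl1,
                      List.getElem?_append_left hi]
                    exact List.getElem?_eq_getElem hi)
                (fun y hy => by
                  rcases List.mem_append.mp hy with hy' | hy'
                  · rcases List.mem_append.mp hy' with hy'' | hy''
                    · exact hpos y hy''
                    · simp at hy''; omega
                  · simp at hy'; omega)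
                (by omega)
              simpa [List.length_append, hl1len] using this
            · -- A's fuel runs out after the first append; B's extra element is
              -- cut off by the final slice
              have hlen1 : l.length + 1 = N.toNat := by omega
              have hfa1 : N.toNat - (l.length + 1) = 0 := by omega
              rw [hfa1, pvLoopA]
              have hstop : ¬ (((l1 ++ [3 * x + 1]).length : Int) < N) := by
                rw [List.length_append, hl1len]
                push_cast
                omega
              rw [pvLoopB_stop N _ _ _ _ hstop]
              have htake1 : l1.take N.toNat = l1 := by
                rw [← hlen1, ← hl1len]
                exact List.take_length
              have htake2 : (l1 ++ [3 * x + 1]).take N.toNat = l1 := by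
                rw [← hlen1, ← hl1len]
                exact List.take_left
              rw [htake1, htake2]
      · -- i past the end: Python would raise IndexError in both versions;
        -- here both ports return l
        have hget : PySem.List.pyGet? l (i : Int) = none := by
          rw [PySem.List.pyGet?_natCast]
          exact List.getElem?_eq_none (by omega)
        rw [hget]
        have : ∀ j, j < l.length → pvEx s l j := fun j hj => hinv j (by omega)
        rw [pvLoopA_stuck s l _ (pvScanA_none s l this)]
    · simp only [hlen, if_neg, not_false_iff]
      have : N.toNat - l.length = 0 := by omega
      rw [this, pvLoopA]

-- ===== VERDICT (by name: the statement is the Claim_ definition above) =====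
theorem in_tap_hop_N23_spec : Claim_equal_in_tap_hop_N23 := by
  intro N _
  unfold Spec_in_tap_hop_N23 in_tap_hop_N23 in_tap_hop_N23_alt
  by_cases hN : 0 < N
  · have hs : ∀ (l : List Int), PySem.List.slice l none (some N) = l.take N.toNat :=
      fun l => PySem.List.slice_to l (by omega)
    rw [hs, hs]
    have hfa : (N - 1).toNat = N.toNat - ([1] : List Int).length := by
      simp only [List.length_cons, List.length_nil]
      omega
    rw [hfa]
    exact pvMain N N.toNat (PySem.Set.ofList [1]) [1] 0
      (fun j hj => by omega)
      (fun x hx => by simp at hx; omega)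
      (by omega)
  · have h1 : (N - 1).toNat = 0 := by omega
    have h2 : N.toNat = 0 := by omega
    rw [h1, h2, pvLoopA, pvLoopB]
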